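-- pv_equiv track=rewrite | github.com/lautarolma/Python_Piscine | Module_03/ex3/ft_achievement_tracker.py | get_only_player_has
-- ===== SOURCE A (Python) =====
-- def get_only_player_has(
--     player: str, player_achievements: dict[str, set[str]]
-- ) -> set[str]:
--     """
--     Get achievements that only this player has (no one else).
--     Uses difference between player's achievements and union of others.
--     """
--     player_set = player_achievements[player]
--
--     # Union of all OTHER players' achievements
--     others_achievements: set[str] = set()
--     for other_player, achievements in player_achievements.items():
--         if other_player != player:
--             others_achievements = others_achievements.union(achievements)
--
--     # What only this player has = player's - others
--     return player_set.difference(others_achievements)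
-- ===== SOURCE B (Python) =====
-- def get_only_player_has(
--     player: str, player_achievements: dict[str, set[str]]
-- ) -> set[str]:
--     """
--     Get achievements that only this player has (no one else).
--     Counts, per achievement, how many players own it, then keeps
--     the player's achievements owned by exactly one player.
--     """
--     player_set = player_achievements[player]
--
--     counts: dict[str, int] = {}
--     for achievements in player_achievements.values():
--         for a in achievements:
--             counts[a] = counts.get(a, 0) + 1
--
--     return {a for a in player_set if counts.get(a, 0) == 1}
-- ===== Notes on version B (the rewrite author's own statement) =====
-- stated objective: alternative
-- what changed: Replaces the accumulated union of all other players' sets and a set difference by a single ownership-count table (one increment per player per achievement) and a filter of the player's set for count == 1.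
import Mathlib
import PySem

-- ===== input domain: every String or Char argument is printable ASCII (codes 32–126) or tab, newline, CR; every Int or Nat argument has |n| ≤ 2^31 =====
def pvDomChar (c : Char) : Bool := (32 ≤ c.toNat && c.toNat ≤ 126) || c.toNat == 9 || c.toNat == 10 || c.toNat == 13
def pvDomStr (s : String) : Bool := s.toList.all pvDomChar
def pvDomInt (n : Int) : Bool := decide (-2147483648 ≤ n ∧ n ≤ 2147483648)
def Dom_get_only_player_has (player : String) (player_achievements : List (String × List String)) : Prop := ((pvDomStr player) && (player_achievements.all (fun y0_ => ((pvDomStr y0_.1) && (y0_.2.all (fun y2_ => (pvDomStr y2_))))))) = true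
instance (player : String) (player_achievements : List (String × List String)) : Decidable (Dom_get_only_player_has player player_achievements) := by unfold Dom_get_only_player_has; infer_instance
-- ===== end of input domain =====

-- B replaces A's union-of-others + set difference by one ownership-count table and a filter (objective: alternative).

-- ===== PORT A =====
-- A: player_set = d[player]; union the OTHER players' sets; return player_set - others.
def get_only_player_has (player : String) (player_achievements : List (String × List String)) : List String :=
  let d := PySem.Dict.mk player_achievements
  match d.get? player with
  | none => []  -- Python raises KeyError here; excluded by Pre_
  | some player_set =>
    let others := d.items.foldl
      (fun acc kv => if kv.1 ≠ player then PySem.Set.union acc kv.2 else acc)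
      PySem.Set.empty
    PySem.Set.diff player_set others

-- ===== PORT B =====
-- B: count, per achievement, how many players own it; keep the player's achievements with count 1.
def get_only_player_has_alt (player : String) (player_achievements : List (String × List String)) : List String :=
  let d := PySem.Dict.mk player_achievements
  match d.get? player with
  | none => []  -- Python raises KeyError here; excluded by Pre_
  | some player_set =>
    let counts := d.values.foldl
      (fun c achievements =>
        achievements.foldl (fun c a => c.modify a (0 : Int) (· + 1)) c)
      PySem.Dict.empty
    PySem.Set.ofList (player_set.filter (fun a => PySem.Dict.getD counts a 0 == 1))

-- ===== PRECONDITION & SPEC =====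
-- Pre_ requires the player to be present (A raises KeyError otherwise) and the association list to be a
-- faithful image of a Python dict[str, set[str]]: distinct keys and duplicate-free value lists — every
-- input arising from an actual Python dict of sets satisfies these, so nothing A returns on is excluded.
def Pre_get_only_player_has (player : String) (player_achievements : List (String × List String)) : Prop :=
  (PySem.Dict.mk player_achievements).contains player = true ∧
  (player_achievements.map Prod.fst).Nodup ∧
  ∀ kv ∈ player_achievements, kv.2.Nodup
instance (player : String) (player_achievements : List (String × List String)) : Decidable (Pre_get_only_player_has player player_achievements) := by unfold Pre_get_only_player_has; infer_instance

def pvWitness_get_only_player_has : String × (List (String × List String)) :=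
  ("alice", [("alice", ["a", "b"]), ("bob", ["b", "c"])])

def Spec_get_only_player_has (player : String) (player_achievements : List (String × List String)) (out : List String) : Prop := out = get_only_player_has_alt player player_achievements
instance (player : String) (player_achievements : List (String × List String)) (out : List String) : Decidable (Spec_get_only_player_has player player_achievements out) := by unfold Spec_get_only_player_has; infer_instance

-- ===== CLAIM (what is proved, stated in full; the proofs are below) =====
def Claim_equal_get_only_player_has : Prop := ∀ (player : String) (player_achievements : List (String × List String)), Dom_get_only_player_has player player_achievements → Pre_get_only_player_has player player_achievements → Spec_get_only_player_has player player_achievements (get_only_player_has player player_achievements)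

-- ===== LEMMAS AND PROOFS =====

-- B's nested counting loop: final count of v = how often v occurs among all value lists flattened.
theorem pv_counts_getD (lists : List (List String)) (d : PySem.Dict String Int) (v : String) :
    (lists.foldl (fun c achievements =>
        achievements.foldl (fun c a => c.modify a (0 : Int) (· + 1)) c) d).getD v 0
      = d.getD v 0 + (lists.flatten.count v : Int) := by
  induction lists generalizing d with
  | nil => simp
  | cons l t ih =>
    simp only [List.foldl_cons, List.flatten_cons, List.count_append]
    rw [ih, PySem.Dict.getD_foldl_modify_add_one]
    push_cast; ring

-- A's union loop: membership in the accumulated union.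
theorem pv_mem_foldl_union (l : List (String × List String)) (s : PySem.Set String) (y : String) :
    (y ∈ l.foldl (fun acc kv => PySem.Set.union acc kv.2) s) ↔ y ∈ s ∨ ∃ kv ∈ l, y ∈ kv.2 := by
  induction l generalizing s with
  | nil => simp
  | cons kv t ih =>
    simp only [List.foldl_cons, ih, PySem.Set.mem_union, List.mem_cons]
    constructor
    · rintro (( h | h) | ⟨p, hp, hy⟩)
      · exact Or.inl h
      · exact Or.inr ⟨kv, Or.inl rfl, h⟩
      · exact Or.inr ⟨p, Or.inr hp, hy⟩
    · rintro (h | ⟨p, (rfl | hp), hy⟩)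
      · exact Or.inl (Or.inl h)
      · exact Or.inl (Or.inr hy)
      · exact Or.inr ⟨p, hp, hy⟩

-- With duplicate-free value lists, the flattened count is the number of entries containing a.
theorem pv_count_flatten (pa : List (String × List String)) (a : String)
    (hv : ∀ kv ∈ pa, kv.2.Nodup) :
    (pa.map (·.2)).flatten.count a = pa.countP (fun kv => decide (a ∈ kv.2)) := by
  induction pa with
  | nil => simp
  | cons kv t ih =>
    simp only [List.map_cons, List.flatten_cons, List.count_append, List.countP_cons]
    rw [ih (fun p hp => hv p (List.mem_cons_of_mem _ hp))]
    by_cases h : a ∈ kv.2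
    · rw [List.count_eq_one_of_mem (hv kv (List.mem_cons_self)) h]; simp [h]; omega
    · rw [List.count_eq_zero_of_not_mem h]; simp [h]

-- With distinct keys, exactly one entry has the player's key, and it is (player, ps);
-- so the owner count splits off that one entry.
theorem pv_countP_split (pa : List (String × List String)) (player : String) (ps : List String)
    (a : String) (hk : (pa.map Prod.fst).Nodup) (hmem : (player, ps) ∈ pa) (ha : a ∈ ps) :
    pa.countP (fun kv => decide (a ∈ kv.2))
      = 1 + pa.countP (fun kv => decide (kv.1 ≠ player ∧ a ∈ kv.2)) := by
  induction pa with
  | nil => simp at hmem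
  | cons kv t ih =>
    simp only [List.map_cons, List.nodup_cons, List.mem_map] at hk
    obtain ⟨hk1, hk2⟩ := hk
    rcases List.mem_cons.mp hmem with rfl | hmemt
    · -- head is the player's entry; no tail entry has the player's key
      have htail : t.countP (fun kv => decide (a ∈ kv.2))
          = t.countP (fun kv => decide (kv.1 ≠ player ∧ a ∈ kv.2)) := by
        apply List.countP_congr
        intro p hp
        have hne : p.1 ≠ player := fun h => hk1 ⟨p, hp, h⟩
        simp [hne]
      simp only [List.countP_cons, htail]
      simp [ha]
      omega
    · -- head has a different key; it contributes equally to both counts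
      have hne : kv.1 ≠ player := by
        intro h
        exact hk1 ⟨(player, ps), hmemt, h.symm⟩
      simp only [List.countP_cons, ih hk2 hmemt]
      by_cases h : a ∈ kv.2
      · simp [h, hne]; omega
      · simp [h, hne]

-- ===== VERDICT (by name: the statement is the Claim_ definition above) =====
theorem get_only_player_has_spec : Claim_equal_get_only_player_has := by
  intro player pa _ hpre
  obtain ⟨hcont, hkeys, hvals⟩ := hpre
  unfold Spec_get_only_player_has get_only_player_has get_only_player_has_alt
  simp only
  -- the lookup succeeds
  rw [PySem.Dict.contains_eq_isSome_get?] at hcont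
  obtain ⟨ps, hget⟩ := Option.isSome_iff_exists.mp hcont
  rw [hget]
  dsimp only
  have hpsmem : (player, ps) ∈ pa := PySem.Dict.mem_items_of_get?_eq_some _ hget
  have hpsnd : ps.Nodup := hvals _ hpsmem
  -- B's side: the filtered player_set is duplicate-free, so ofList is the identity
  rw [PySem.Set.ofList_eq_self_of_nodup]
  -- both sides are filters of ps: show the predicates agree on members of ps
  unfold PySem.Set.diff
  apply List.filter_congr
  intro a ha
  -- left: a not in the union of the other players' sets
  have hunion : ((PySem.Dict.mk pa).items.foldl
      (fun acc kv => if kv.1 ≠ player then PySem.Set.union acc kv.2 else acc)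
      PySem.Set.empty) = (pa.filter (fun kv => decide (kv.1 ≠ player))).foldl
      (fun acc kv => PySem.Set.union acc kv.2) PySem.Set.empty := by
    simpa using PySem.List.foldl_ite_eq_foldl_filter
      (p := fun kv : String × List String => kv.1 ≠ player)
      (f := fun acc kv => PySem.Set.union acc kv.2)
      (l := (PySem.Dict.mk pa).items) (init := PySem.Set.empty)
  rw [hunion]
  -- right: the count of a over all value lists
  have hcount : (((PySem.Dict.mk pa).values.foldl
      (fun c achievements =>
        achievements.foldl (fun c a => c.modify a (0 : Int) (· + 1)) c)
      PySem.Dict.empty).getD a 0) = ((pa.map (·.2)).flatten.count a : Int) := by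
    rw [pv_counts_getD]
    simp [PySem.Dict.values]
  rw [Bool.eq_iff_iff]
  simp only [Bool.not_eq_eq_eq_not, Bool.not_true, PySem.Set.contains_eq_listContains,
    beq_iff_eq, hcount]
  rw [pv_count_flatten pa a hvals, pv_countP_split pa player ps a hkeys hpsmem ha]
  constructor
  · -- a in no other player's set → the extra count is 0
    intro hno
    have hzero : pa.countP (fun kv => decide (kv.1 ≠ player ∧ a ∈ kv.2)) = 0 := by
      rw [List.countP_eq_zero]
      intro kv hkv
      simp only [decide_eq_true_eq, not_and]
      intro hne hmem
      have hmem2 : a ∈ (pa.filter (fun kv => decide (kv.1 ≠ player))).foldl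
          (fun acc kv => PySem.Set.union acc kv.2) PySem.Set.empty := by
        rw [pv_mem_foldl_union]
        exact Or.inr ⟨kv, List.mem_filter.mpr ⟨hkv, by simp [hne]⟩, hmem⟩
      rw [← List.contains_iff_mem] at hmem2
      rw [hmem2] at hno
      exact absurd hno (by simp)
    rw [hzero]
    simp
  · -- the count is 1 → a in no other player's set
    intro h1
    have h0 : pa.countP (fun kv => decide (kv.1 ≠ player ∧ a ∈ kv.2)) = 0 := by omega
    rw [List.countP_eq_zero] at h0
    rw [Bool.eq_false_iff]
    intro hc
    rw [List.contains_iff_mem, pv_mem_foldl_union] at hc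
    rcases hc with h | ⟨kv, hkv, hmem⟩
    · simp [PySem.Set.empty] at h
    · have := h0 kv (List.mem_filter.mp hkv).1
      have hne : kv.1 ≠ player := by simpa using (List.mem_filter.mp hkv).2
      simp [hne, hmem] at this
  · exact List.Nodup.filter _ hpsnd
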